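-- pv_equiv track=rewrite | github.com/jlazovskis/neurotop-nest | nsimplex/recursive_maximal_count.py | get_sig
-- ===== SOURCE A (Python) =====
-- def get_sig(matrix):
--     sig = 0
--     c = 0
--     for i, row in enumerate(matrix):
--         for j in row[i+1:]:
--             sig += j*2**c
--             c += 1
--     return int(sig + 2**c)
-- ===== SOURCE B (Python) =====
-- def get_sig(matrix):
--     entries = []
--     i = 1
--     for row in matrix:
--         entries += row[i:]
--         i += 1
--     r = 1
--     for j in reversed(entries):
--         r = r * 2 + j
--     return int(r)
-- ===== Notes on version B (the rewrite author's own statement) =====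
-- stated objective: faster
-- what changed: Replaces the single stateful loop (running counter c, sig += j*2**c, final + 2**c) by two staged passes: first collect the strict upper-triangular entries into one flat list, then evaluate that list by a Horner multiply-accumulate r = r*2 + j over it in reverse, seeded 1 (which supplies the 2**c top bit), so no counter or per-entry 2**c big-int powers are formed.
import Mathlib
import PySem

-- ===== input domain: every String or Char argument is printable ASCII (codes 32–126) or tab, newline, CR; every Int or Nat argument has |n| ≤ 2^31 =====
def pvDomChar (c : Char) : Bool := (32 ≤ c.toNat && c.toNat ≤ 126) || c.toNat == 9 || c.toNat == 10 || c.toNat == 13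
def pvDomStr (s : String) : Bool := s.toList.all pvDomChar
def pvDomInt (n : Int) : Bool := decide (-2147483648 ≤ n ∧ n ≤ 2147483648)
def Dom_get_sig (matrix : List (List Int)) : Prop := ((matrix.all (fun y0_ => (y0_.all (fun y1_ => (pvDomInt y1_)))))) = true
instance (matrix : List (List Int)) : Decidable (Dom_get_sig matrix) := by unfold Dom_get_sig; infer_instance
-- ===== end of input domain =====

-- ===== PORT A =====
-- A: one stateful loop — running counter c, sig += j * 2**c over the flattened strict upper triangle, finally sig + 2**c.
def get_sig (matrix : List (List Int)) : Int :=
  let st := (PySem.List.enumerate matrix).foldl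
    (fun (st : Int × Int) (p : Int × List Int) =>
      (PySem.List.slice p.2 (some (p.1 + 1)) none).foldl
        (fun (st : Int × Int) (j : Int) => (st.1 + j * 2 ^ st.2.toNat, st.2 + 1)) st)
    (0, 0)
  st.1 + 2 ^ st.2.toNat

-- ===== PORT B =====
-- B: two staged passes — collect the strict upper-triangular entries (manual index counter i starting at 1),
-- then Horner multiply-accumulate over them in reverse, seeded 1.
def get_sig_alt (matrix : List (List Int)) : Int :=
  let st := matrix.foldl
    (fun (st : List Int × Int) (row : List Int) =>
      (st.1 ++ PySem.List.slice row (some st.2) none, st.2 + 1))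
    ([], (1 : Int))
  st.1.reverse.foldl (fun (r : Int) (j : Int) => r * 2 + j) 1

-- ===== PRECONDITION & SPEC =====
def Spec_get_sig (matrix : List (List Int)) (out : Int) : Prop := out = get_sig_alt matrix
instance (matrix : List (List Int)) (out : Int) : Decidable (Spec_get_sig matrix out) := by unfold Spec_get_sig; infer_instance

-- ===== CLAIM (what is proved, stated in full; the proofs are below) =====
def Claim_equal_get_sig : Prop := ∀ (matrix : List (List Int)), Dom_get_sig matrix → Spec_get_sig matrix (get_sig matrix)

-- ===== LEMMAS AND PROOFS =====
-- the flattened strict-upper-triangle entry stream, slicing row k (0-based, first row = start) from index i + k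
def pvEnt : List (List Int) → Int → List Int
  | [], _ => []
  | r :: t, i => PySem.List.slice r (some i) none ++ pvEnt t (i + 1)

-- little-endian base-2 value of an entry list
def pvVal (l : List Int) : Int := l.foldr (fun j a => j + 2 * a) 0

theorem pvVal_append (l l' : List Int) :
    pvVal (l ++ l') = pvVal l + 2 ^ l.length * pvVal l' := by
  induction l with
  | nil => simp [pvVal]
  | cons x t ih =>
    simp only [List.cons_append, pvVal, List.foldr_cons, List.length_cons, pow_succ] at *
    rw [ih]; ring

theorem a_inner (l : List Int) (sig c : Int) (hc : 0 ≤ c) :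
    l.foldl (fun (st : Int × Int) (j : Int) => (st.1 + j * 2 ^ st.2.toNat, st.2 + 1)) (sig, c)
      = (sig + pvVal l * 2 ^ c.toNat, c + l.length) := by
  induction l generalizing sig c with
  | nil => simp [pvVal]
  | cons x t ih =>
    simp only [List.foldl_cons]
    rw [ih (sig + x * 2 ^ c.toNat) (c + 1) (by omega)]
    have h1 : (c + 1).toNat = c.toNat + 1 := by omega
    rw [Prod.mk.injEq]
    refine ⟨?_, by simp only [List.length_cons]; push_cast; ring⟩
    simp only [pvVal, List.foldr_cons]
    rw [h1, pow_succ]; ring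

theorem a_outer (m : List (List Int)) (i : Int) (sig c : Int) (hc : 0 ≤ c) :
    (PySem.List.enumerate m i).foldl
        (fun (st : Int × Int) (p : Int × List Int) =>
          (PySem.List.slice p.2 (some (p.1 + 1)) none).foldl
            (fun (st : Int × Int) (j : Int) => (st.1 + j * 2 ^ st.2.toNat, st.2 + 1)) st)
        (sig, c)
      = (sig + pvVal (pvEnt m (i + 1)) * 2 ^ c.toNat, c + (pvEnt m (i + 1)).length) := by
  induction m generalizing i sig c with
  | nil => simp [PySem.List.enumerate_nil, pvEnt, pvVal]
  | cons r t ih =>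
    rw [PySem.List.enumerate_cons]
    simp only [List.foldl_cons]
    rw [a_inner _ sig c hc, ih _ _ _ (by positivity)]
    have h1 : (c + ((PySem.List.slice r (some (i + 1)) none).length : Int)).toNat
        = c.toNat + (PySem.List.slice r (some (i + 1)) none).length := by omega
    rw [Prod.mk.injEq]
    refine ⟨?_, ?_⟩
    · simp only [pvEnt, pvVal_append]
      rw [h1, pow_add]; ring
    · simp only [pvEnt, List.length_append]; push_cast; ring

theorem b_collect (m : List (List Int)) (acc : List Int) (i : Int) :
    m.foldl
        (fun (st : List Int × Int) (row : List Int) =>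
          (st.1 ++ PySem.List.slice row (some st.2) none, st.2 + 1))
        (acc, i)
      = (acc ++ pvEnt m i, i + m.length) := by
  induction m generalizing acc i with
  | nil => simp [pvEnt]
  | cons r t ih =>
    simp only [List.foldl_cons]
    rw [ih]
    simp only [pvEnt, List.append_assoc, List.length_cons]
    refine Prod.mk.injEq .. ▸ ⟨rfl, by push_cast; ring⟩

theorem b_horner (l : List Int) (r : Int) :
    l.reverse.foldl (fun (r : Int) (j : Int) => r * 2 + j) r
      = r * 2 ^ l.length + pvVal l := by
  induction l generalizing r with
  | nil => simp [pvVal]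
  | cons x t ih =>
    simp only [List.reverse_cons, List.foldl_append, List.foldl_cons, List.foldl_nil]
    rw [ih r]
    simp [pvVal, pow_succ]; ring

-- ===== VERDICT (by name: the statement is the Claim_ definition above) =====
theorem get_sig_spec : Claim_equal_get_sig := by
  intro matrix _
  unfold Spec_get_sig get_sig get_sig_alt
  rw [a_outer matrix 0 0 0 le_rfl, b_collect matrix [] 1]
  simp only [List.nil_append]
  rw [b_horner]
  simp only [Int.toNat_zero, pow_zero, mul_one, one_mul, zero_add, Int.toNat_natCast]
  ring
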